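-- pv_equiv track=rewrite | github.com/lofeodo/multiview-invariance | benchmark.py | _canonicalize_model
-- ===== SOURCE A (Python) =====
-- MODEL_PRICING_USD_PER_1M: dict[str, dict[str, float]] = {
--     "gpt-4o":       {"input": 2.5,  "cached_input": 1.25,  "output": 10.0},
--     "gpt-4o-mini":  {"input": 0.15, "cached_input": 0.075, "output": 0.6},
--     "gpt-4.1":      {"input": 2.0,  "cached_input": 0.5,   "output": 8.0},
--     "gpt-4.1-mini": {"input": 0.4,  "cached_input": 0.1,   "output": 1.6},
--     "gpt-4.1-nano": {"input": 0.1,  "cached_input": 0.025, "output": 0.4},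
--     "gpt-5.4":      {"input": 3.0,  "cached_input": 0.3,   "output": 12.0},
-- }
--
-- def _canonicalize_model(model_name: str | None) -> str | None:
--     if not model_name:
--         return None
--     lowered = model_name.lower()
--     for prefix in sorted(MODEL_PRICING_USD_PER_1M, key=len, reverse=True):
--         if lowered == prefix or lowered.startswith(prefix + "-"):
--             return prefix
--     return lowered
-- ===== SOURCE B (Python) =====
-- MODEL_PRICING_USD_PER_1M: dict[str, dict[str, float]] = {
--     "gpt-4o":       {"input": 2.5,  "cached_input": 1.25,  "output": 10.0},
--     "gpt-4o-mini":  {"input": 0.15, "cached_input": 0.075, "output": 0.6},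
--     "gpt-4.1":      {"input": 2.0,  "cached_input": 0.5,   "output": 8.0},
--     "gpt-4.1-mini": {"input": 0.4,  "cached_input": 0.1,   "output": 1.6},
--     "gpt-4.1-nano": {"input": 0.1,  "cached_input": 0.025, "output": 0.4},
--     "gpt-5.4":      {"input": 3.0,  "cached_input": 0.3,   "output": 12.0},
-- }
--
-- def _canonicalize_model(model_name):
--     # Generate candidates from the input instead of scanning the table:
--     # the dash-boundary prefixes of the lowered name, tried longest first.
--     if not model_name:
--         return None
--     lowered = model_name.lower()
--     cands = [lowered[:i] for i, ch in enumerate(lowered) if ch == '-']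
--     for cand in [lowered] + cands[::-1]:
--         if cand in MODEL_PRICING_USD_PER_1M:
--             return cand
--     return lowered
-- ===== Notes on version B (the rewrite author's own statement) =====
-- stated objective: alternative
-- what changed: Instead of scanning all pricing-table keys sorted by length and testing each as a prefix, B generates the dash-boundary prefixes of the lowered name, tries them longest first, and looks each up directly in the table.
import Mathlib
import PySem

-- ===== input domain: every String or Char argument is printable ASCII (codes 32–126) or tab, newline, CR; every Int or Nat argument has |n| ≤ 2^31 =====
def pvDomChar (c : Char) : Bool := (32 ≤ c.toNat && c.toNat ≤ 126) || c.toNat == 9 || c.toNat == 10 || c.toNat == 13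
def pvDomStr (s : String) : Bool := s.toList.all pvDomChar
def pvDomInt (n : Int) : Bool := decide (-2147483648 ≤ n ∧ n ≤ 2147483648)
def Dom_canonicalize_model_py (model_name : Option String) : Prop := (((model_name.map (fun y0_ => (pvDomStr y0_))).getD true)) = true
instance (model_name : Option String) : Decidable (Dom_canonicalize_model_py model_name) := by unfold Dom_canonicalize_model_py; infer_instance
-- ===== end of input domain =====

-- ===== PORT A =====
-- B generates candidate keys from the input's dash boundaries (longest first) and looks each
-- up directly, instead of A's scan over all table keys sorted by length; objective: alternative.
-- The module constant MODEL_PRICING_USD_PER_1M is consulted only through its KEYS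
-- (insertion order); the float price values are never used, so only the keys are ported.
def pvKeys : List (List Char) :=
  ["gpt-4o".toList, "gpt-4o-mini".toList, "gpt-4.1".toList,
   "gpt-4.1-mini".toList, "gpt-4.1-nano".toList, "gpt-5.4".toList]

-- the 'for prefix in sorted(...)' loop: first key matching 'lowered == p or lowered.startswith(p + "-")'
def pvScanA (lowered : List Char) : List (List Char) → Option (List Char)
  | [] => none
  | p :: ps =>
    if lowered = p ∨ PySem.Chars.startswith lowered (p ++ ['-']) = true then some p
    else pvScanA lowered ps

def canonicalize_model_py (model_name : Option String) : Option String :=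
  match model_name with
  | none => none
  | some s =>
    if s.toList = [] then none          -- 'if not model_name: return None'
    else
      let lowered := PySem.Chars.lower s.toList
      match pvScanA lowered (PySem.List.sorted pvKeys (fun k => k.length) true) with
      | some p => some (String.ofList p)
      | none => some (String.ofList lowered)   -- 'return lowered'

-- ===== PORT B =====
-- '[lowered[:i] for i, ch in enumerate(lowered) if ch == '-']'
def pvCandPrefixes (lowered : List Char) : List (List Char) :=
  ((PySem.List.enumerate lowered).filter (fun p => p.2 == '-')).map
    (fun p => PySem.List.slice lowered none (some p.1))

-- 'for cand in ...: if cand in MODEL_PRICING_USD_PER_1M: return cand'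
def pvFindKey : List (List Char) → Option (List Char)
  | [] => none
  | c :: cs => if pvKeys.contains c then some c else pvFindKey cs

def canonicalize_model_py_alt (model_name : Option String) : Option String :=
  match model_name with
  | none => none
  | some s =>
    if s.toList = [] then none          -- 'if not model_name: return None'
    else
      let lowered := PySem.Chars.lower s.toList
      let cands := pvCandPrefixes lowered
      match pvFindKey (lowered :: cands.reverse) with   -- '[lowered] + cands[::-1]'
      | some c => some (String.ofList c)
      | none => some (String.ofList lowered)   -- 'return lowered'

-- ===== PRECONDITION & SPEC =====
def Spec_canonicalize_model_py (model_name : Option String) (out : Option String) : Prop := out = canonicalize_model_py_alt model_name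
instance (model_name : Option String) (out : Option String) : Decidable (Spec_canonicalize_model_py model_name out) := by unfold Spec_canonicalize_model_py; infer_instance

-- ===== CLAIM (what is proved, stated in full; the proofs are below) =====
def Claim_equal_canonicalize_model_py : Prop := ∀ (model_name : Option String), Dom_canonicalize_model_py model_name → Spec_canonicalize_model_py model_name (canonicalize_model_py model_name)

-- ===== LEMMAS AND PROOFS =====

-- Python's stable length-descending sort of the six keys, as a concrete list.
theorem pv_sorted_keys :
    PySem.List.sorted pvKeys (fun k => k.length) true =
      ["gpt-4.1-mini".toList, "gpt-4.1-nano".toList, "gpt-4o-mini".toList,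
       "gpt-4.1".toList, "gpt-5.4".toList, "gpt-4o".toList] := by
  decide

-- the dash-boundary proper prefixes of l are exactly the c with c ++ ['-'] a prefix of l
theorem pv_prefix_dash_iff (l c : List Char) :
    (c ++ ['-']) <+: l ↔ ∃ i : Nat, ∃ _ : i < l.length, l[i] = '-' ∧ c = l.take i := by
  constructor
  · intro h
    have hlen : c.length + 1 ≤ l.length := by simpa using h.length_le
    have htake : l.take (c.length + 1) = c ++ ['-'] := by
      simpa using (List.prefix_iff_eq_take.mp h).symm
    refine ⟨c.length, by omega, ?_, ?_⟩
    · have := List.IsPrefix.getElem h (i := c.length) (by simp)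
      simpa using this.symm
    · have : (l.take (c.length + 1)).take c.length = c := by
        rw [htake]; simp
      simpa [List.take_take] using this.symm
  · rintro ⟨i, hi, hd, rfl⟩
    have : l.take i ++ ['-'] = l.take (i + 1) := by
      rw [List.take_add_one]
      simp [List.getElem?_eq_getElem hi, hd]
    rw [this]
    exact List.take_prefix _ _

theorem pv_mem_candPrefixes (l c : List Char) :
    c ∈ pvCandPrefixes l ↔ ∃ i : Nat, ∃ _ : i < l.length, l[i] = '-' ∧ c = l.take i := by
  unfold pvCandPrefixes
  simp only [List.mem_map, List.mem_filter, PySem.List.mem_enumerate_iff]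
  constructor
  · rintro ⟨p, ⟨⟨k, hk, rfl⟩, hd⟩, rfl⟩
    refine ⟨k, hk, by simpa using hd, ?_⟩
    simp [PySem.List.slice_to_natCast]
  · rintro ⟨i, hi, hd, rfl⟩
    refine ⟨((i : Int), l[i]), ⟨⟨i, hi, by simp⟩, by simpa using hd⟩, ?_⟩
    simp [PySem.List.slice_to_natCast]

theorem pv_mem_CL (l c : List Char) :
    c ∈ (l :: (pvCandPrefixes l).reverse) ↔ c = l ∨ (c ++ ['-']) <+: l := by
  simp only [List.mem_cons, List.mem_reverse, pv_mem_candPrefixes, pv_prefix_dash_iff]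

theorem pv_pairwise_CL (l : List Char) :
    (l :: (pvCandPrefixes l).reverse).Pairwise (fun a b => b.length < a.length) := by
  rw [List.pairwise_cons]
  constructor
  · intro c hc
    rw [List.mem_reverse] at hc
    obtain ⟨i, hi, _, rfl⟩ := (pv_mem_candPrefixes l c).mp hc
    simpa using hi
  · rw [List.pairwise_reverse]
    unfold pvCandPrefixes
    rw [List.pairwise_map]
    have h0 : ((PySem.List.enumerate l 0).filter (fun p => p.2 == '-')).Pairwise
        (fun p q => p.1 < q.1) :=
      (PySem.List.pairwise_lt_enumerate l 0).filter _
    refine h0.imp_of_mem ?_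
    intro a b ha hb hab
    obtain ⟨k, hk, rfl⟩ := (PySem.List.mem_enumerate_iff _ _ _).mp (List.mem_of_mem_filter ha)
    obtain ⟨m, hm, rfl⟩ := (PySem.List.mem_enumerate_iff _ _ _).mp (List.mem_of_mem_filter hb)
    simp only [PySem.List.slice_to_natCast, List.length_take, zero_add] at *
    have : k < m := by exact_mod_cast hab
    omega

theorem pv_findKey_none (cl : List (List Char)) (h : ∀ c ∈ cl, c ∉ pvKeys) :
    pvFindKey cl = none := by
  induction cl with
  | nil => rfl
  | cons c cs ih =>
    have hc : c ∉ pvKeys := h c (by simp)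
    simp only [pvFindKey, List.contains_iff_mem, if_neg hc]
    exact ih (fun x hx => h x (by simp [hx]))

theorem pv_findKey_some (cl : List (List Char)) (p : List Char)
    (hpw : cl.Pairwise (fun a b => b.length < a.length))
    (h1 : p ∈ cl) (h2 : p ∈ pvKeys)
    (h3 : ∀ q ∈ pvKeys, q ∈ cl → q.length ≤ p.length) :
    pvFindKey cl = some p := by
  induction cl with
  | nil => cases h1
  | cons c cs ih =>
    by_cases hc : pvKeys.contains c
    · have hcK : c ∈ pvKeys := by simpa [List.contains_iff_mem] using hc
      have hle : c.length ≤ p.length := h3 c hcK (by simp)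
      have hcp : c = p := by
        rcases List.mem_cons.mp h1 with h | h
        · exact h.symm
        · exact absurd ((List.pairwise_cons.mp hpw).1 p h) (by omega)
      simp only [pvFindKey, List.contains_iff_mem]
      rw [if_pos hcK, hcp]
    · have hc' : c ∉ pvKeys := by simpa [List.contains_iff_mem] using hc
      have hp : p ∈ cs := by
        rcases List.mem_cons.mp h1 with h | h
        · exact absurd (h ▸ h2) hc'
        · exact h
      simp only [pvFindKey, List.contains_iff_mem, if_neg hc']
      exact ih (List.pairwise_cons.mp hpw).2 hp
        (fun q hq hq' => h3 q hq (by simp [hq']))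

-- the heart: A's scan over the sorted keys = B's scan over the dash-boundary candidates
-- the two shapes of 'key q matches lowered l', interconverted
theorem pv_m_of_mem (l q : List Char) (h : q = l ∨ (q ++ ['-']) <+: l) :
    l = q ∨ PySem.Chars.startswith l (q ++ ['-']) = true := by
  rcases h with h | h
  · exact Or.inl h.symm
  · exact Or.inr ((PySem.Chars.startswith_iff _ _).mpr h)

theorem pv_mem_of_m (l q : List Char)
    (h : l = q ∨ PySem.Chars.startswith l (q ++ ['-']) = true) :
    q = l ∨ (q ++ ['-']) <+: l := by
  rcases h with h | h
  · exact Or.inl h.symm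
  · exact Or.inr ((PySem.Chars.startswith_iff _ _).mp h)

theorem pv_scan_eq (l : List Char) :
    pvScanA l (PySem.List.sorted pvKeys (fun k => k.length) true) =
      pvFindKey (l :: (pvCandPrefixes l).reverse) := by
  rw [pv_sorted_keys]
  simp only [pvScanA]
  have memK : ∀ q, q ∈ pvKeys ↔
      (q = "gpt-4o".toList ∨ q = "gpt-4o-mini".toList ∨ q = "gpt-4.1".toList ∨
       q = "gpt-4.1-mini".toList ∨ q = "gpt-4.1-nano".toList ∨ q = "gpt-5.4".toList) := by
    intro q; simp [pvKeys]
  split_ifs with h1 h2 h3 h4 h5 h6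
  · symm
    apply pv_findKey_some _ _ (pv_pairwise_CL l)
    · exact (pv_mem_CL l _).mpr (pv_mem_of_m l _ h1)
    · decide
    · intro q hq hq'
      have hm := pv_m_of_mem l q ((pv_mem_CL l q).mp hq')
      rcases (memK q).mp hq with rfl | rfl | rfl | rfl | rfl | rfl
      · decide
      · decide
      · decide
      · decide
      · decide
      · decide
  · symm
    apply pv_findKey_some _ _ (pv_pairwise_CL l)
    · exact (pv_mem_CL l _).mpr (pv_mem_of_m l _ h2)
    · decide
    · intro q hq hq'
      have hm := pv_m_of_mem l q ((pv_mem_CL l q).mp hq')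
      rcases (memK q).mp hq with rfl | rfl | rfl | rfl | rfl | rfl
      · decide
      · decide
      · decide
      · decide
      · decide
      · decide
  · symm
    apply pv_findKey_some _ _ (pv_pairwise_CL l)
    · exact (pv_mem_CL l _).mpr (pv_mem_of_m l _ h3)
    · decide
    · intro q hq hq'
      have hm := pv_m_of_mem l q ((pv_mem_CL l q).mp hq')
      rcases (memK q).mp hq with rfl | rfl | rfl | rfl | rfl | rfl
      · decide
      · decide
      · decide
      · exact absurd hm h1
      · exact absurd hm h2
      · decide
  · symm
    apply pv_findKey_some _ _ (pv_pairwise_CL l)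
    · exact (pv_mem_CL l _).mpr (pv_mem_of_m l _ h4)
    · decide
    · intro q hq hq'
      have hm := pv_m_of_mem l q ((pv_mem_CL l q).mp hq')
      rcases (memK q).mp hq with rfl | rfl | rfl | rfl | rfl | rfl
      · decide
      · exact absurd hm h3
      · decide
      · exact absurd hm h1
      · exact absurd hm h2
      · decide
  · symm
    apply pv_findKey_some _ _ (pv_pairwise_CL l)
    · exact (pv_mem_CL l _).mpr (pv_mem_of_m l _ h5)
    · decide
    · intro q hq hq'
      have hm := pv_m_of_mem l q ((pv_mem_CL l q).mp hq')
      rcases (memK q).mp hq with rfl | rfl | rfl | rfl | rfl | rfl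
      · decide
      · exact absurd hm h3
      · decide
      · exact absurd hm h1
      · exact absurd hm h2
      · decide
  · symm
    apply pv_findKey_some _ _ (pv_pairwise_CL l)
    · exact (pv_mem_CL l _).mpr (pv_mem_of_m l _ h6)
    · decide
    · intro q hq hq'
      have hm := pv_m_of_mem l q ((pv_mem_CL l q).mp hq')
      rcases (memK q).mp hq with rfl | rfl | rfl | rfl | rfl | rfl
      · decide
      · exact absurd hm h3
      · exact absurd hm h4
      · exact absurd hm h1
      · exact absurd hm h2
      · exact absurd hm h5
  · symm
    apply pv_findKey_none
    intro c hc hcK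
    have hm := pv_m_of_mem l c ((pv_mem_CL l c).mp hc)
    rcases (memK c).mp hcK with rfl | rfl | rfl | rfl | rfl | rfl
    · exact absurd hm h6
    · exact absurd hm h3
    · exact absurd hm h4
    · exact absurd hm h1
    · exact absurd hm h2
    · exact absurd hm h5

-- ===== VERDICT (by name: the statement is the Claim_ definition above) =====
theorem canonicalize_model_py_spec : Claim_equal_canonicalize_model_py := by
  intro model_name _
  unfold Spec_canonicalize_model_py
  match model_name with
  | none => rfl
  | some s =>
    simp only [canonicalize_model_py, canonicalize_model_py_alt]
    by_cases h : s.toList = []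
    · simp [h]
    · simp only [h]
      rw [pv_scan_eq]
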